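-- pv_equiv track=rewrite | github.com/Prozer1/INF8775_TPs | TP1/brute_force_lent.py | compute_skyline
-- ===== SOURCE A (Python) =====
-- def compute_skyline(args_list, crit_points):
--     solution = []
--     last_point = (-1,-1)
--     for coords in crit_points:
--         crit_x = int(coords[0])
--         crit_y = int(coords[1])
--         for buildings in args_list:
--             x_1, x_2, h = int(buildings[0]), int(buildings[1]), int(buildings[2])
--             if ((crit_x >= x_1 and crit_x < x_2) and (crit_y >= 0 and crit_y <= h)):
--                 if crit_y < h:
--                     crit_y = h
--         if crit_y != last_point[1]:
--             solution.append(f"{crit_x} {crit_y}\n")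
--             last_point = (crit_x, crit_y)
--     return solution
-- ===== SOURCE B (Python) =====
-- def compute_skyline(args_list, crit_points):
--     if not crit_points:
--         return []
--     towers = sorted(((int(b[0]), int(b[1]), int(b[2])) for b in args_list),
--                     key=lambda t: t[2], reverse=True)
--     solution = []
--     last_y = -1
--     for coords in crit_points:
--         x, y = int(coords[0]), int(coords[1])
--         if y >= 0:
--             for x1, x2, h in towers:
--                 if x1 <= x < x2:
--                     if h > y:
--                         y = h
--                     break
--         if y != last_y:
--             solution.append(f"{x} {y}\n")
--             last_y = y
--     return solution
-- ===== Notes on version B (the rewrite author's own statement) =====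
-- stated objective: alternative
-- what changed: B sorts the buildings once by height descending and answers each critical point by its first covering building (early exit) combined with a closed-form max, instead of A's full stateful scan over all buildings per point with a coupled running-max condition.
import Mathlib
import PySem

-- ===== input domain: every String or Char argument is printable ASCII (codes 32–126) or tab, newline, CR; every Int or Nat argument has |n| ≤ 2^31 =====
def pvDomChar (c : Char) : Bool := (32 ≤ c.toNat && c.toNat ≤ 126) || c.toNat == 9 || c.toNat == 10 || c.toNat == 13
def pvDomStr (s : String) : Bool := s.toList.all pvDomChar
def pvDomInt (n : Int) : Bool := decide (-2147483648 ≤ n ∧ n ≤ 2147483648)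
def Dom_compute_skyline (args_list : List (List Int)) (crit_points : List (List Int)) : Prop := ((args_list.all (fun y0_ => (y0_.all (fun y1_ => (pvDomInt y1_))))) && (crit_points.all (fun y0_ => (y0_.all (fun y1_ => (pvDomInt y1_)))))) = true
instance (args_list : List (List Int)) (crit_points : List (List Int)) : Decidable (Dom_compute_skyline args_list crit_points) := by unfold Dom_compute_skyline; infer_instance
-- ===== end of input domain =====

-- B replaces A's per-point full scan (running max with a coupled condition) by one
-- height-descending sort of the buildings plus a first-covering-building lookup per point
-- (objective: alternative algorithm of similar cost).

-- ===== PORT A =====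
-- one building step of A's inner loop (indices via pyGet?; defaults unreachable under Pre_)
def aStep (crit_x : Int) (cy : Int) (b : List Int) : Int :=
  let x1 := (PySem.List.pyGet? b 0).getD 0
  let x2 := (PySem.List.pyGet? b 1).getD 0
  let h  := (PySem.List.pyGet? b 2).getD 0
  if crit_x ≥ x1 ∧ crit_x < x2 ∧ cy ≥ 0 ∧ cy ≤ h then (if cy < h then h else cy) else cy

def compute_skyline (args_list : List (List Int)) (crit_points : List (List Int)) : List String :=
  (crit_points.foldl (fun (st : List String × Int × Int) coords =>
      let cx := (PySem.List.pyGet? coords 0).getD 0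
      let cy0 := (PySem.List.pyGet? coords 1).getD 0
      let cy := args_list.foldl (aStep cx) cy0
      if cy ≠ st.2.2 then
        (st.1 ++ [PySem.Int.toStr cx ++ " " ++ PySem.Int.toStr cy ++ "\n"], (cx, cy))
      else st)
    ([], (-1, -1))).1

-- ===== PORT B =====
def altTowers (args_list : List (List Int)) : List (Int × Int × Int) :=
  PySem.List.sorted
    (args_list.map (fun b =>
      ((PySem.List.pyGet? b 0).getD 0, (PySem.List.pyGet? b 1).getD 0, (PySem.List.pyGet? b 2).getD 0)))
    (fun t => t.2.2) true

def altFirstHit (x : Int) : List (Int × Int × Int) → Int → Int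
  | [], y => y
  | (x1, _x2, h) :: rest, y =>
      if x1 ≤ x ∧ x < _x2 then (if h > y then h else y) else altFirstHit x rest y

def compute_skyline_alt (args_list : List (List Int)) (crit_points : List (List Int)) : List String :=
  if crit_points = [] then [] else
  let towers := altTowers args_list
  (crit_points.foldl (fun (st : List String × Int) coords =>
      let x := (PySem.List.pyGet? coords 0).getD 0
      let y0 := (PySem.List.pyGet? coords 1).getD 0
      let y := if y0 ≥ 0 then altFirstHit x towers y0 else y0
      if y ≠ st.2 then
        (st.1 ++ [PySem.Int.toStr x ++ " " ++ PySem.Int.toStr y ++ "\n"], y)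
      else st)
    ([], -1)).1

-- ===== PRECONDITION & SPEC =====
-- Pre_ excludes exactly the inputs where Python A raises IndexError: a critical point with
-- fewer than 2 coordinates, or (when at least one critical point exists) a building with
-- fewer than 3 entries.
def Pre_compute_skyline (args_list : List (List Int)) (crit_points : List (List Int)) : Prop :=
  (∀ c ∈ crit_points, 2 ≤ c.length) ∧ (crit_points = [] ∨ ∀ b ∈ args_list, 3 ≤ b.length)
instance (args_list : List (List Int)) (crit_points : List (List Int)) : Decidable (Pre_compute_skyline args_list crit_points) := by unfold Pre_compute_skyline; infer_instance

def pvWitness_compute_skyline : List (List Int) × List (List Int) :=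
  ([[0, 3, 5], [2, 6, 2]], [[0, 0], [2, 0], [3, 0], [6, 0]])

def Spec_compute_skyline (args_list : List (List Int)) (crit_points : List (List Int)) (out : List String) : Prop := out = compute_skyline_alt args_list crit_points
instance (args_list : List (List Int)) (crit_points : List (List Int)) (out : List String) : Decidable (Spec_compute_skyline args_list crit_points out) := by unfold Spec_compute_skyline; infer_instance

-- ===== CLAIM (what is proved, stated in full; the proofs are below) =====
def Claim_equal_compute_skyline : Prop := ∀ (args_list : List (List Int)) (crit_points : List (List Int)), Dom_compute_skyline args_list crit_points → Pre_compute_skyline args_list crit_points → Spec_compute_skyline args_list crit_points (compute_skyline args_list crit_points)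

-- ===== LEMMAS AND PROOFS =====

-- the order-free characterisation both ports are reduced to: "take the max height of a
-- covering building"
def mStep (cx : Int) (cy : Int) (t : Int × Int × Int) : Int :=
  if t.1 ≤ cx ∧ cx < t.2.1 then max cy t.2.2 else cy

def triple (b : List Int) : Int × Int × Int :=
  ((PySem.List.pyGet? b 0).getD 0, (PySem.List.pyGet? b 1).getD 0, (PySem.List.pyGet? b 2).getD 0)

lemma foldl_aStep_neg (cx : Int) (l : List (List Int)) (y : Int) (hy : y < 0) :
    l.foldl (aStep cx) y = y := by
  induction l with
  | nil => rfl
  | cons b l ih =>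
      have : aStep cx y b = y := by
        simp only [aStep]; split_ifs <;> omega
      simp [List.foldl, this, ih]

lemma foldl_aStep_eq_mStep (cx : Int) (l : List (List Int)) (y : Int) (hy : 0 ≤ y) :
    l.foldl (aStep cx) y = (l.map triple).foldl (mStep cx) y := by
  induction l generalizing y with
  | nil => rfl
  | cons b l ih =>
      have hstep : aStep cx y b = mStep cx y (triple b) := by
        simp only [aStep, mStep, triple]
        split_ifs <;> omega
      have hnn : 0 ≤ mStep cx y (triple b) := by
        simp only [mStep]; split_ifs <;> omega
      simp only [List.foldl, List.map, hstep]
      exact ih _ hnn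

lemma mStep_left_comm (cx : Int) : ∀ (y : Int) (a b : Int × Int × Int),
    mStep cx (mStep cx y a) b = mStep cx (mStep cx y b) a := by
  intro y a b
  simp only [mStep]
  split_ifs <;> omega

lemma foldl_mStep_perm (cx : Int) {l1 l2 : List (Int × Int × Int)} (h : l1.Perm l2) (y : Int) :
    l1.foldl (mStep cx) y = l2.foldl (mStep cx) y :=
  h.foldl_eq' (fun a _ b _ z => mStep_left_comm cx z a b) y

lemma foldl_mStep_le (cx : Int) (l : List (Int × Int × Int)) (a : Int)
    (h : ∀ t ∈ l, t.2.2 ≤ a) : l.foldl (mStep cx) a = a := by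
  induction l with
  | nil => rfl
  | cons t l ih =>
      have ht : mStep cx a t = a := by
        simp only [mStep]; split_ifs with _
        · have := h t (by simp); omega
        · rfl
      simp only [List.foldl, ht]
      exact ih (fun t' ht' => h t' (by simp [ht']))

lemma firstHit_eq_foldl (cx : Int) (l : List (Int × Int × Int))
    (hs : l.Pairwise (fun a b => b.2.2 ≤ a.2.2)) (y : Int) :
    altFirstHit cx l y = l.foldl (mStep cx) y := by
  induction l generalizing y with
  | nil => rfl
  | cons t l ih =>
      obtain ⟨x1, x2, h⟩ := t
      rw [List.pairwise_cons] at hs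
      by_cases hc : x1 ≤ cx ∧ cx < x2
      · have h1 : altFirstHit cx ((x1, x2, h) :: l) y = max y h := by
          simp only [altFirstHit, if_pos hc]
          split_ifs <;> omega
        have h2 : mStep cx y (x1, x2, h) = max y h := by
          simp only [mStep]; simp [hc]
        have h3 : l.foldl (mStep cx) (max y h) = max y h :=
          foldl_mStep_le cx l _ (fun t' ht' => le_trans (hs.1 t' ht') (le_max_right _ _))
        simp only [List.foldl, h1, h2, h3]
      · simp only [altFirstHit, if_neg hc, List.foldl]
        have h2 : mStep cx y (x1, x2, h) = y := by simp only [mStep]; simp [hc]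
        rw [h2, ih hs.2]

-- per-critical-point agreement of the two programs' heights
lemma height_eq (cx y : Int) (args : List (List Int)) :
    args.foldl (aStep cx) y = (if y ≥ 0 then altFirstHit cx (altTowers args) y else y) := by
  by_cases hy : 0 ≤ y
  · rw [if_pos hy, foldl_aStep_eq_mStep cx args y hy,
      firstHit_eq_foldl cx (altTowers args) (PySem.List.sorted_pairwise_rev _ _) y]
    exact foldl_mStep_perm cx (PySem.List.sorted_perm _ _ _).symm y
  · rw [if_neg hy, foldl_aStep_neg cx args y (by omega)]

-- the two output folds agree whenever the last printed heights agree
lemma fold_eq (args : List (List Int)) (crit : List (List Int)) :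
    ∀ (sol : List String) (lx ly : Int),
    (crit.foldl (fun (st : List String × Int × Int) coords =>
      let cx := (PySem.List.pyGet? coords 0).getD 0
      let cy0 := (PySem.List.pyGet? coords 1).getD 0
      let cy := args.foldl (aStep cx) cy0
      if cy ≠ st.2.2 then
        (st.1 ++ [PySem.Int.toStr cx ++ " " ++ PySem.Int.toStr cy ++ "\n"], (cx, cy))
      else st) (sol, (lx, ly))).1 =
    (crit.foldl (fun (st : List String × Int) coords =>
      let x := (PySem.List.pyGet? coords 0).getD 0
      let y0 := (PySem.List.pyGet? coords 1).getD 0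
      let y := if y0 ≥ 0 then altFirstHit x (altTowers args) y0 else y0
      if y ≠ st.2 then
        (st.1 ++ [PySem.Int.toStr x ++ " " ++ PySem.Int.toStr y ++ "\n"], y)
      else st) (sol, ly)).1 := by
  induction crit with
  | nil => intro sol lx ly; rfl
  | cons c crit ih =>
      intro sol lx ly
      simp only [List.foldl]
      rw [height_eq]
      by_cases hne : (if ((PySem.List.pyGet? c 1).getD 0) ≥ 0 then
          altFirstHit ((PySem.List.pyGet? c 0).getD 0) (altTowers args) ((PySem.List.pyGet? c 1).getD 0)
          else ((PySem.List.pyGet? c 1).getD 0)) ≠ ly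
      · simp only [if_pos hne]; exact ih _ _ _
      · simp only [if_neg hne]; exact ih _ _ _

-- ===== VERDICT (by name: the statement is the Claim_ definition above) =====
theorem compute_skyline_spec : Claim_equal_compute_skyline := by
  intro args crit _ _
  unfold Spec_compute_skyline compute_skyline compute_skyline_alt
  by_cases h : crit = []
  · subst h; rfl
  · rw [if_neg h]
    exact fold_eq args crit [] (-1) (-1)
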